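-- pv_equiv track=rewrite | github.com/chadepl/tudelft-complex-networks | function.py | get_popularity_per_time
-- ===== SOURCE A (Python) =====
-- def get_popularity_per_time(edges_per_t):
--     in_node_popularity = {}
--     out_node_popularity = {}
--     in_last_checked = {}
--     out_last_checked = {}
--
--     sorted_edges = dict(sorted(edges_per_t.items(), key=lambda s: s[0]))
--
--     for k, v in sorted_edges.items():
--
--         for e in v:
--             if e[0] not in out_node_popularity.keys():
--                 out_node_popularity[e[0]] = {k: 1}
--             else:
--                 if k not in out_node_popularity[e[0]].keys():
--                     out_node_popularity[e[0]][k] = out_node_popularity[e[0]][out_last_checked[e[0]]] + 1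
--                 else:
--                     out_node_popularity[e[0]][k] += 1
--             out_last_checked[e[0]] = k
--             if e[1] not in in_node_popularity.keys():
--                 in_node_popularity[e[1]] = {k: 1}
--             else:
--                 if k not in in_node_popularity[e[1]].keys():
--                     in_node_popularity[e[1]][k] = in_node_popularity[e[1]][in_last_checked[e[1]]] + 1
--                 else:
--                     in_node_popularity[e[1]][k] += 1
--             in_last_checked[e[1]] = k
--     return in_node_popularity, out_node_popularity
-- ===== SOURCE B (Python) =====
-- def get_popularity_per_time(edges_per_t):
--     # Phase 1: gather, per node, the full multiset of timestamps at which it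
--     # emits (out) or receives (in) an edge, in chronological order.
--     out_times = {}
--     in_times = {}
--     for k, v in sorted(edges_per_t.items(), key=lambda s: s[0]):
--         for u, w in v:
--             out_times.setdefault(u, []).append(k)
--             in_times.setdefault(w, []).append(k)
--
--     # Phase 2: turn each node's timestamp list into its cumulative series.
--     def cumulate(times_by_node):
--         pop = {}
--         for node, ts in times_by_node.items():
--             series = {}
--             total = 0
--             for t in ts:
--                 total += 1
--                 series[t] = total
--             pop[node] = series
--         return pop
--
--     return cumulate(in_times), cumulate(out_times)
-- ===== Notes on version B (the rewrite author's own statement) =====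
-- stated objective: alternative
-- what changed: B is two staged passes: it first gathers, per node, the chronological list of timestamps of its in/out edges, then in a separate pass turns each list into its cumulative series; A instead builds the per-node series incrementally in one pass using in/out last_checked tables and three-way carry branches. Pre_ only excludes association lists with a duplicate timestamp key, which cannot arise from a Python dict argument.
import Mathlib
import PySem

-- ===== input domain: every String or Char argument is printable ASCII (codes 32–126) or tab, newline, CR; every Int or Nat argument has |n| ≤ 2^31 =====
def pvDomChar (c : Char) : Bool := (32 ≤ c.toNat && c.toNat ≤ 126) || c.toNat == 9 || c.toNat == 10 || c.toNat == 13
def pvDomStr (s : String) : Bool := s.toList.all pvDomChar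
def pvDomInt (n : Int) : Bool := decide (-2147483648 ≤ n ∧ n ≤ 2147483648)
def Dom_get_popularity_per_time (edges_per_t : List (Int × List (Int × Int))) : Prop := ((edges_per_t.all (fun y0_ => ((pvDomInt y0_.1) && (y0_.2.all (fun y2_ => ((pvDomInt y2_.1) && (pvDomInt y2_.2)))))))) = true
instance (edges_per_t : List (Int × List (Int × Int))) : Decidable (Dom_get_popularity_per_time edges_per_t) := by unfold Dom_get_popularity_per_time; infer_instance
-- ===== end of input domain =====

-- B is a two-phase reformulation (gather each node's timestamp list, then compute every
-- cumulative series in a second pass), replacing A's single pass of incremental per-node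
-- dict updates with last_checked carry branches (objective: alternative).

-- ===== PORT A =====
-- The out- and in- halves of A's edge body are textually identical up to which
-- dicts they touch; pvSideA is that body once, applied to either side's state.
def pvSideA (k u : Int) (pop : PySem.Dict Int (PySem.Dict Int Int))
    (last : PySem.Dict Int Int) :
    PySem.Dict Int (PySem.Dict Int Int) × PySem.Dict Int Int :=
  let pop' :=
    if pop.contains u = false then
      pop.insert u (PySem.Dict.ofList [(k, 1)])
    else
      if (pop.getD u PySem.Dict.empty).contains k = false then
        pop.insert u ((pop.getD u PySem.Dict.empty).insert k
          ((pop.getD u PySem.Dict.empty).getD (last.getD u 0) 0 + 1))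
      else
        pop.insert u ((pop.getD u PySem.Dict.empty).modify k 0 (· + 1))
  (pop', last.insert u k)

-- state: (in_node_popularity, out_node_popularity, in_last_checked, out_last_checked)
def pvStepA (k : Int)
    (st : PySem.Dict Int (PySem.Dict Int Int) × PySem.Dict Int (PySem.Dict Int Int) ×
          PySem.Dict Int Int × PySem.Dict Int Int) (e : Int × Int) :
    PySem.Dict Int (PySem.Dict Int Int) × PySem.Dict Int (PySem.Dict Int Int) ×
    PySem.Dict Int Int × PySem.Dict Int Int :=
  let o := pvSideA k e.1 st.2.1 st.2.2.2
  let i := pvSideA k e.2 st.1 st.2.2.1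
  (i.1, o.1, i.2, o.2)

def get_popularity_per_time (edges_per_t : List (Int × List (Int × Int))) :
    (List (Int × List (Int × Int))) × (List (Int × List (Int × Int))) :=
  let sorted_edges := PySem.Dict.ofList (PySem.List.sorted edges_per_t (fun s => s.1))
  let st := sorted_edges.items.foldl
    (fun st kv => kv.2.foldl (pvStepA kv.1) st)
    (PySem.Dict.empty, PySem.Dict.empty, PySem.Dict.empty, PySem.Dict.empty)
  (st.1.items.map (fun p => (p.1, p.2.items)),
   st.2.1.items.map (fun p => (p.1, p.2.items)))

-- ===== PORT B =====
-- times.setdefault(node, []).append(k): the fresh-or-existing list gains k in place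
def pvAppend (G : PySem.Dict Int (List Int)) (u k : Int) : PySem.Dict Int (List Int) :=
  let G1 := G.setdefault u []
  G1.insert u (G1.getD u [] ++ [k])

-- phase-1 state: (out_times, in_times); body of Source B's gathering loop
def pvGatherStep (k : Int)
    (st : PySem.Dict Int (List Int) × PySem.Dict Int (List Int)) (e : Int × Int) :
    PySem.Dict Int (List Int) × PySem.Dict Int (List Int) :=
  (pvAppend st.1 e.1 k, pvAppend st.2 e.2 k)

-- Source B's inner cumulative loop: (series, total) over a node's timestamp list
def pvSeries (ts : List Int) : PySem.Dict Int Int × Int :=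
  ts.foldl (fun st t => (st.1.insert t (st.2 + 1), st.2 + 1)) (PySem.Dict.empty, 0)

-- Source B's cumulate(): one series dict per node, in the gathered node order
def pvCumulate (d : PySem.Dict Int (List Int)) : PySem.Dict Int (PySem.Dict Int Int) :=
  d.items.foldl (fun pop p => pop.insert p.1 (pvSeries p.2).1) PySem.Dict.empty

def get_popularity_per_time_alt (edges_per_t : List (Int × List (Int × Int))) :
    (List (Int × List (Int × Int))) × (List (Int × List (Int × Int))) :=
  let g := (PySem.List.sorted edges_per_t (fun s => s.1)).foldl
    (fun st kv => kv.2.foldl (pvGatherStep kv.1) st)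
    (PySem.Dict.empty, PySem.Dict.empty)
  ((pvCumulate g.2).items.map (fun p => (p.1, p.2.items)),
   (pvCumulate g.1).items.map (fun p => (p.1, p.2.items)))

-- ===== PRECONDITION & SPEC =====
-- Pre_ excludes association lists with a duplicate timestamp key: such a list is
-- not the image of any Python dict argument (A's parameter is a dict), and on it
-- dict(sorted(...)) would collapse groups while B's direct pass over the sorted
-- list would not.
def Pre_get_popularity_per_time (edges_per_t : List (Int × List (Int × Int))) : Prop :=
  (edges_per_t.map Prod.fst).Nodup
instance (edges_per_t : List (Int × List (Int × Int))) : Decidable (Pre_get_popularity_per_time edges_per_t) := by unfold Pre_get_popularity_per_time; infer_instance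

def pvWitness_get_popularity_per_time : (List (Int × List (Int × Int))) :=
  [(1, [(2, 3)]), (0, [(2, 4), (5, 2)])]

def Spec_get_popularity_per_time (edges_per_t : List (Int × List (Int × Int))) (out : (List (Int × List (Int × Int))) × (List (Int × List (Int × Int)))) : Prop := out = get_popularity_per_time_alt edges_per_t
instance (edges_per_t : List (Int × List (Int × Int))) (out : (List (Int × List (Int × Int))) × (List (Int × List (Int × Int)))) : Decidable (Spec_get_popularity_per_time edges_per_t out) := by unfold Spec_get_popularity_per_time; infer_instance

-- ===== CLAIM (what is proved, stated in full; the proofs are below) =====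
def Claim_equal_get_popularity_per_time : Prop := ∀ (edges_per_t : List (Int × List (Int × Int))), Dom_get_popularity_per_time edges_per_t → Pre_get_popularity_per_time edges_per_t → Spec_get_popularity_per_time edges_per_t (get_popularity_per_time edges_per_t)

-- ===== LEMMAS AND PROOFS =====

-- a dup-free pair list is reproduced verbatim by dict()
lemma pv_items_ofList {κ ν : Type} [BEq κ] [LawfulBEq κ]
    (l : List (κ × ν)) (h : (l.map Prod.fst).Nodup) :
    (PySem.Dict.ofList l).items = l := by
  have := PySem.Dict.items_foldl_insert_fresh l Prod.fst Prod.snd PySem.Dict.empty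
    (fun a _ => PySem.Dict.contains_empty _) h
  simpa [PySem.Dict.ofList, PySem.Dict.update] using this

-- one side of A's/B's per-edge work, as a fold over the endpoint list of a group
def pvSFA (k : Int) (us : List Int)
    (s : PySem.Dict Int (PySem.Dict Int Int) × PySem.Dict Int Int) :
    PySem.Dict Int (PySem.Dict Int Int) × PySem.Dict Int Int :=
  us.foldl (fun p u => pvSideA k u p.1 p.2) s

def pvSFB (k : Int) (us : List Int) (G : PySem.Dict Int (List Int)) :
    PySem.Dict Int (List Int) :=
  us.foldl (fun G u => pvAppend G u k) G

-- setdefault-then-append is one insert of the extended list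
lemma pvAppend_eq (G : PySem.Dict Int (List Int)) (u k : Int) :
    pvAppend G u k = G.insert u (G.getD u [] ++ [k]) := by
  unfold pvAppend
  by_cases hc : G.contains u = true
  · rw [PySem.Dict.setdefault_of_contains _ _ hc]
  · have hc' : G.contains u = false := by simpa using hc
    rw [PySem.Dict.setdefault_of_not_contains _ _ hc']
    simp only []
    rw [PySem.Dict.getD_insert_self, PySem.Dict.insert_insert_self,
        PySem.Dict.getD_of_not_contains _ _ hc']

-- per-side runs over the whole (key, endpoint list) group sequence
def pvRunSA (gs : List (Int × List Int))
    (s : PySem.Dict Int (PySem.Dict Int Int) × PySem.Dict Int Int) :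
    PySem.Dict Int (PySem.Dict Int Int) × PySem.Dict Int Int :=
  gs.foldl (fun s g => pvSFA g.1 g.2 s) s

def pvRunSB (gs : List (Int × List Int)) (G : PySem.Dict Int (List Int)) :
    PySem.Dict Int (List Int) :=
  gs.foldl (fun G g => pvSFB g.1 g.2 G) G

-- A's interleaved four-dict fold splits into two independent per-side folds
lemma pv_splitA_inner (k : Int) (v : List (Int × Int)) (st) :
    v.foldl (pvStepA k) st =
      ((pvSFA k (v.map (·.2)) (st.1, st.2.2.1)).1,
       (pvSFA k (v.map (·.1)) (st.2.1, st.2.2.2)).1,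
       (pvSFA k (v.map (·.2)) (st.1, st.2.2.1)).2,
       (pvSFA k (v.map (·.1)) (st.2.1, st.2.2.2)).2) := by
  induction v generalizing st with
  | nil => simp [pvSFA]
  | cons e t ih =>
      simp only [List.foldl_cons, List.map_cons, pvSFA, ih, pvStepA]

lemma pv_splitA (gs : List (Int × List (Int × Int))) (st) :
    gs.foldl (fun st kv => kv.2.foldl (pvStepA kv.1) st) st =
      ((pvRunSA (gs.map (fun kv => (kv.1, kv.2.map (·.2)))) (st.1, st.2.2.1)).1,
       (pvRunSA (gs.map (fun kv => (kv.1, kv.2.map (·.1)))) (st.2.1, st.2.2.2)).1,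
       (pvRunSA (gs.map (fun kv => (kv.1, kv.2.map (·.2)))) (st.1, st.2.2.1)).2,
       (pvRunSA (gs.map (fun kv => (kv.1, kv.2.map (·.1)))) (st.2.1, st.2.2.2)).2) := by
  induction gs generalizing st with
  | nil => simp [pvRunSA]
  | cons g t ih =>
      simp only [List.foldl_cons, List.map_cons]
      rw [pv_splitA_inner, ih]
      simp [pvRunSA]

-- B's gathering fold splits the same way
lemma pv_splitB_inner (k : Int) (v : List (Int × Int)) (st) :
    v.foldl (pvGatherStep k) st =
      (pvSFB k (v.map (·.1)) st.1, pvSFB k (v.map (·.2)) st.2) := by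
  induction v generalizing st with
  | nil => simp [pvSFB]
  | cons e t ih =>
      simp only [List.foldl_cons, List.map_cons, pvSFB, ih, pvGatherStep]

lemma pv_splitB (gs : List (Int × List (Int × Int))) (st) :
    gs.foldl (fun st kv => kv.2.foldl (pvGatherStep kv.1) st) st =
      (pvRunSB (gs.map (fun kv => (kv.1, kv.2.map (·.1)))) st.1,
       pvRunSB (gs.map (fun kv => (kv.1, kv.2.map (·.2)))) st.2) := by
  induction gs generalizing st with
  | nil => simp [pvRunSB]
  | cons g t ih =>
      simp only [List.foldl_cons, List.map_cons]
      rw [pv_splitB_inner, ih]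
      simp [pvRunSB]

-- facts about pvSeries
lemma pvSeries_snd_aux (ts : List Int) (d : PySem.Dict Int Int) (n : Int) :
    (ts.foldl (fun st t => (st.1.insert t (st.2 + 1), st.2 + 1)) (d, n)).2
      = n + ts.length := by
  induction ts generalizing d n with
  | nil => simp
  | cons t r ih => simp [ih]; ring

lemma pvSeries_append (ts : List Int) (t : Int) :
    pvSeries (ts ++ [t]) = ((pvSeries ts).1.insert t ((ts.length : Int) + 1),
                            (ts.length : Int) + 1) := by
  unfold pvSeries
  rw [List.foldl_append]
  have h2 := pvSeries_snd_aux ts PySem.Dict.empty 0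
  simp only [List.foldl_cons, List.foldl_nil]
  rw [show (List.foldl (fun st t => (st.1.insert t (st.2 + 1), st.2 + 1))
        (PySem.Dict.empty, 0) ts).2 = (ts.length : Int) by simpa using h2]

lemma pvSeries_contains (ts : List Int) (x : Int) :
    (pvSeries ts).1.contains x = ts.contains x := by
  induction ts using List.reverseRecOn with
  | nil => simp [pvSeries, PySem.Dict.contains_empty]
  | append_singleton r t ih =>
      rw [pvSeries_append, PySem.Dict.contains_insert, ih]
      by_cases h1 : x = t <;> by_cases h2 : x ∈ r <;> simp [h1, h2]

lemma pvSeries_getD_last (ts : List Int) (t : Int) :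
    ((pvSeries (ts ++ [t])).1).getD t 0 = (ts.length : Int) + 1 := by
  rw [pvSeries_append, PySem.Dict.getD_insert_self]

-- the coupling invariant between A's (pop, last_checked) and B's gathered
-- timestamp lists, for one side, while timestamps ≤ k have been processed
def pvInv (k : Int)
    (s : PySem.Dict Int (PySem.Dict Int Int) × PySem.Dict Int Int)
    (G : PySem.Dict Int (List Int)) : Prop :=
  s.1.items = G.items.map (fun p => (p.1, (pvSeries p.2).1)) ∧
  G.keys.Nodup ∧
  ∀ u : Int,
    (∀ t ∈ G.getD u [], t ≤ k) ∧
    (G.contains u = true → G.getD u [] ≠ []) ∧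
    s.2.getD u 0 = (G.getD u []).getLastD 0 ∧
    (∀ t ∈ G.getD u [], t ≤ (G.getD u []).getLastD 0)

lemma pvInv_keys {k s G} (h : pvInv k s G) : s.1.keys = G.keys := by
  show s.1.items.map (·.1) = G.items.map (·.1)
  rw [h.1, List.map_map]
  rfl

lemma pvInv_contains {k s G} (h : pvInv k s G) (u : Int) :
    s.1.contains u = G.contains u := by
  rw [PySem.Dict.contains_eq_decide_mem_keys, PySem.Dict.contains_eq_decide_mem_keys,
      pvInv_keys h]

lemma pvInv_getD {k s G} (h : pvInv k s G) (u : Int) (hc : G.contains u = true) :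
    s.1.getD u PySem.Dict.empty = (pvSeries (G.getD u [])).1 := by
  have hg : G.get? u = some (G.getD u []) := by
    cases hq : G.get? u with
    | none => rw [PySem.Dict.contains_eq_isSome_get?, hq] at hc; simp at hc
    | some v => rw [PySem.Dict.getD_eq_get?_getD, hq]; rfl
  have hmem : (u, G.getD u []) ∈ G.items := PySem.Dict.mem_items_of_get?_eq_some _ hg
  have hmem' : (u, (pvSeries (G.getD u [])).1) ∈ s.1.items := by
    rw [h.1]
    exact List.mem_map.mpr ⟨_, hmem, rfl⟩
  exact PySem.Dict.getD_of_mem_items _ hmem' (by rw [pvInv_keys h]; exact h.2.1) _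

-- · A's per-edge body equals one insert of the extended cumulative series
lemma pvSideA_eq {k : Int} (u : Int) {s G} (h : pvInv k s G) :
    pvSideA k u s.1 s.2 =
      (s.1.insert u (pvSeries (G.getD u [] ++ [k])).1, s.2.insert u k) := by
  obtain ⟨h1, hnd, hu⟩ := h
  obtain ⟨hbound, hne, hlast, hmax⟩ := hu u
  cases hc : G.contains u with
  | false =>
      have hsc : s.1.contains u = false := by
        rw [pvInv_contains ⟨h1, hnd, hu⟩ u, hc]
      have hG0 : G.getD u [] = [] := PySem.Dict.getD_of_not_contains _ _ hc
      simp [pvSideA, hsc, hG0, pvSeries, PySem.Dict.ofList, PySem.Dict.update]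
  | true =>
      have hsc : s.1.contains u = true := by
        rw [pvInv_contains ⟨h1, hnd, hu⟩ u, hc]
      have hGd := pvInv_getD ⟨h1, hnd, hu⟩ u hc
      have hts : G.getD u [] ≠ [] := hne hc
      obtain ⟨ts', L, hdec⟩ := (List.eq_nil_or_concat (G.getD u [])).resolve_left hts
      rw [List.concat_eq_append] at hdec
      have hlastL : (G.getD u []).getLastD 0 = L := by rw [hdec]; simp
      have hgetL : (s.1.getD u PySem.Dict.empty).getD ((G.getD u []).getLastD 0) 0
          = ((G.getD u []).length : Int) := by
        rw [hGd, hlastL, hdec, pvSeries_getD_last]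
        simp [List.length_append]
      simp only [pvSideA, hsc]
      rw [if_neg (by simp)]
      cases hck : (s.1.getD u PySem.Dict.empty).contains k with
      | false =>
          rw [if_pos rfl, hlast, hgetL, hGd, pvSeries_append]
      | true =>
          rw [if_neg (by simp)]
          have hkmem : k ∈ G.getD u [] := by
            have hck' := hck
            rw [hGd, pvSeries_contains] at hck'
            simpa using hck'
          have hkL : k = (G.getD u []).getLastD 0 := by
            have ha : k ≤ (G.getD u []).getLastD 0 := hmax k hkmem
            have hb : (G.getD u []).getLastD 0 ≤ k := by
              apply hbound
              rw [hlastL, hdec]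
              simp
            omega
          have hmod : (s.1.getD u PySem.Dict.empty).modify k 0 (· + 1)
              = (s.1.getD u PySem.Dict.empty).insert k
                  ((s.1.getD u PySem.Dict.empty).getD k 0 + 1) := rfl
          rw [hmod]
          rw [show (s.1.getD u PySem.Dict.empty).getD k 0
              = ((G.getD u []).length : Int) by rw [hkL] at *; exact hgetL]
          rw [hGd, pvSeries_append]

lemma pv_getLastD_concat (l : List Int) (a d : Int) : (l ++ [a]).getLastD d = a := by
  simp

-- · the invariant survives one synchronized edge step
lemma pvInv_step (k u : Int) {s G} (h : pvInv k s G) :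
    pvInv k (pvSideA k u s.1 s.2) (G.insert u (G.getD u [] ++ [k])) := by
  rw [pvSideA_eq u h]
  obtain ⟨h1, hnd, hu⟩ := h
  simp only [pvInv]
  refine ⟨?_, PySem.Dict.nodup_keys_insert _ _ _ hnd, ?_⟩
  · -- items stay aligned
    cases hc : G.contains u with
    | false =>
        have hsc : s.1.contains u = false := by
          rw [pvInv_contains ⟨h1, hnd, hu⟩ u, hc]
        rw [PySem.Dict.items_insert_of_not_contains _ _ hsc,
            PySem.Dict.items_insert_of_not_contains _ _ hc, List.map_append, h1]
        rfl
    | true =>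
        have hsc : s.1.contains u = true := by
          rw [pvInv_contains ⟨h1, hnd, hu⟩ u, hc]
        rw [PySem.Dict.items_insert_of_contains _ _ hsc,
            PySem.Dict.items_insert_of_contains _ _ hc, h1, List.map_map, List.map_map]
        apply List.map_congr_left
        intro p hp
        by_cases hpu : p.1 = u
        · simp [Function.comp, hpu]
        · simp [Function.comp, hpu]
  · intro w
    by_cases hw : w = u
    · subst hw
      obtain ⟨hbound, _, _, _⟩ := hu w
      rw [PySem.Dict.getD_insert_self, PySem.Dict.getD_insert_self, pv_getLastD_concat]
      refine ⟨?_, ?_, rfl, ?_⟩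
      · intro t ht
        rcases List.mem_append.mp ht with ht | ht
        · exact hbound t ht
        · simp at ht; omega
      · intro _; simp
      · intro t ht
        rcases List.mem_append.mp ht with ht | ht
        · exact hbound t ht
        · simp at ht; omega
    · obtain ⟨hbound, hne, hlast, hmax⟩ := hu w
      rw [PySem.Dict.getD_insert_of_ne _ _ _ hw, PySem.Dict.getD_insert_of_ne _ _ _ hw,
          PySem.Dict.contains_insert]
      refine ⟨hbound, ?_, hlast, hmax⟩
      intro hcc
      apply hne
      rcases Bool.or_eq_true _ _ |>.mp hcc with hh | hh
      · exact absurd (by simpa using hh) hw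
      · exact hh

-- the invariant is monotone in the time bound
lemma pvInv_mono {k k' : Int} (hkk : k ≤ k') {s G} (h : pvInv k s G) :
    pvInv k' s G := by
  obtain ⟨h1, hnd, hu⟩ := h
  refine ⟨h1, hnd, fun u => ?_⟩
  obtain ⟨hbound, hne, hlast, hmax⟩ := hu u
  exact ⟨fun t ht => le_trans (hbound t ht) hkk, hne, hlast, hmax⟩

-- one whole timestamp group preserves the invariant
lemma pvInv_group (k : Int) (us : List Int) :
    ∀ s G, pvInv k s G → pvInv k (pvSFA k us s) (pvSFB k us G) := by
  induction us with
  | nil => intro s G h; exact h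
  | cons u t ih =>
      intro s G h
      have := pvInv_step k u h
      simpa [pvSFA, pvSFB, pvAppend_eq] using ih _ _ this

-- running all groups in nondecreasing key order keeps A and B coupled
lemma pvInv_run (t : List (Int × List Int)) :
    ∀ (p : Int × List Int) s G,
      (p :: t).Pairwise (fun a b => a.1 ≤ b.1) →
      pvInv p.1 s G →
      ∃ k', pvInv k' (pvRunSA (p :: t) s) (pvRunSB (p :: t) G) := by
  induction t with
  | nil =>
      intro p s G _ h
      exact ⟨p.1, pvInv_group p.1 p.2 s G h⟩
  | cons q t ih =>
      intro p s G hp h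
      have h1 := pvInv_group p.1 p.2 s G h
      have hpq : p.1 ≤ q.1 := (List.pairwise_cons.mp hp).1 q (by simp)
      have h2 := pvInv_mono hpq h1
      have := ih q _ _ (List.pairwise_cons.mp hp).2 h2
      simpa [pvRunSA, pvRunSB] using this

-- the empty state satisfies the invariant at any time bound
lemma pvInv_empty (k : Int) :
    pvInv k (PySem.Dict.empty, PySem.Dict.empty) PySem.Dict.empty := by
  refine ⟨rfl, List.nodup_nil, fun u => ?_⟩
  rw [PySem.Dict.getD_empty, PySem.Dict.getD_empty]
  exact ⟨by simp, by simp [PySem.Dict.contains_empty], rfl, by simp⟩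

-- coupling at the end gives equality of the rendered outputs
lemma pv_render {k s G} (h : pvInv k s G) :
    s.1.items.map (fun p => (p.1, p.2.items)) =
      (pvCumulate G).items.map (fun p => (p.1, p.2.items)) := by
  have hcum : (pvCumulate G).items
      = G.items.map (fun p => (p.1, (pvSeries p.2).1)) := by
    have := PySem.Dict.items_foldl_insert_fresh G.items Prod.fst
      (fun p => (pvSeries p.2).1) PySem.Dict.empty
      (fun a _ => PySem.Dict.contains_empty _) h.2.1
    simpa [pvCumulate] using this
  rw [hcum, h.1]

-- ===== VERDICT (by name: the statement is the Claim_ definition above) =====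
theorem get_popularity_per_time_spec : Claim_equal_get_popularity_per_time := by
  intro l _ hpre
  unfold Spec_get_popularity_per_time
  unfold get_popularity_per_time get_popularity_per_time_alt
  dsimp only
  have hperm := PySem.List.sorted_perm l (fun s => s.1) false
  have hsl : ((PySem.List.sorted l (fun s => s.1) false).map Prod.fst).Nodup :=
    ((hperm.map Prod.fst).nodup_iff).mpr hpre
  rw [pv_items_ofList _ hsl]
  rw [pv_splitA, pv_splitB]
  have hpair := PySem.List.sorted_pairwise l (fun s => s.1)
  cases hs : PySem.List.sorted l (fun s => s.1) false with
  | nil => rfl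
  | cons p t =>
      rw [hs] at hpair
      have hpairI : ((p :: t).map (fun kv => (kv.1, kv.2.map (·.2)))).Pairwise
          (fun a b => a.1 ≤ b.1) := List.Pairwise.map _ (fun a b hab => hab) hpair
      have hpairO : ((p :: t).map (fun kv => (kv.1, kv.2.map (·.1)))).Pairwise
          (fun a b => a.1 ≤ b.1) := List.Pairwise.map _ (fun a b hab => hab) hpair
      simp only [List.map_cons] at hpairI hpairO ⊢
      obtain ⟨ki, hi⟩ := pvInv_run _ _ _ _ hpairI (pvInv_empty p.1)
      obtain ⟨ko, ho⟩ := pvInv_run _ _ _ _ hpairO (pvInv_empty p.1)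
      rw [pv_render hi, pv_render ho]
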